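-- pv_equiv track=rewrite | github.com/redbananastudios/amazon_fba | shared/lib/python/keepa_client/models.py | _csv_last_value
-- ===== SOURCE A (Python) =====
-- from typing import Any, Optional
--
-- def _csv_last_value(series: Any) -> Optional[int]:
--     """Return the last non-sentinel value in a Keepa csv time-series.
--
--     Keepa's `csv[N]` arrays are interleaved `[time, value, time, value, ...]`
--     — the value sits at every odd index. -1 means "no observation".
--     This helper walks the value-positions right-to-left and returns
--     the most recent real (non-(-1), non-None) observation, or None
--     when the series is empty / all sentinels.
--
--     Real Keepa exports are always even-length, but odd-length arrays
--     can creep in from manual fixtures or truncated transports — so we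
--     explicitly start from the largest *value* index (odd) rather than
--     `len-1` to avoid treating a stray timestamp as a value.
--
--     Used by `market_snapshot()` for `rating` (csv[16]) and
--     `review_count` (csv[17]) which Keepa doesn't expose via stats.
--     """
--     if not isinstance(series, list) or len(series) < 2:
--         return None
--     # Largest value index — odd. For a length-N array:
--     #   N even → start = N-1 (which is odd)
--     #   N odd  → start = N-2 (drop trailing dangling timestamp)
--     start = len(series) - 1 if len(series) % 2 == 0 else len(series) - 2
--     for i in range(start, 0, -2):
--         v = series[i]
--         if v is None:
--             continue
--         try:
--             n = int(v)
--         except (TypeError, ValueError):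
--             continue
--         if n < 0:
--             continue
--         return n
--     return None
-- ===== SOURCE B (Python) =====
-- from typing import Any, Optional
--
-- def _csv_last_value(series: Any) -> Optional[int]:
--     """Forward pair-walk with an accumulator: consume (time, value) pairs
--     left-to-right, remembering the latest valid observation."""
--     if not isinstance(series, list) or len(series) < 2:
--         return None
--     result = None
--     it = iter(series)
--     for _t in it:
--         v = next(it, None)
--         if v is None:
--             continue
--         try:
--             n = int(v)
--         except (TypeError, ValueError):
--             continue
--         if n >= 0:
--             result = n
--     return result
-- ===== Notes on version B (the rewrite author's own statement) =====
-- stated objective: alternative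
-- what changed: Replaces A's right-to-left early-return scan over computed odd indices (parity-dependent start index, range with step -2, indexed access) with a forward structural walk that consumes (time, value) pairs and keeps the latest valid observation in an accumulator; no index arithmetic at all.
import Mathlib
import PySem

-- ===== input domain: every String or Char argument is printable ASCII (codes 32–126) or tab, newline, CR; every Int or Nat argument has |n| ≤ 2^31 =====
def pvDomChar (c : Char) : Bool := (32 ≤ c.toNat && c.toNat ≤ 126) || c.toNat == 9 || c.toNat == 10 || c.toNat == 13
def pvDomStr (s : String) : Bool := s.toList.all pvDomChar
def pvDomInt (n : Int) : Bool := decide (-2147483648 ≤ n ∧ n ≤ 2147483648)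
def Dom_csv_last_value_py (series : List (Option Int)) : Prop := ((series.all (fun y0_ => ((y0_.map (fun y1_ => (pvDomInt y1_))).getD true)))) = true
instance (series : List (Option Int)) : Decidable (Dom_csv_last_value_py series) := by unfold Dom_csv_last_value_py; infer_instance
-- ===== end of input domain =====

-- B replaces A's right-to-left early-return scan over computed odd indices with a
-- forward pair-walk keeping the latest valid observation in an accumulator (alternative, same cost).


-- ===== PORT A =====
-- the `for i in range(start, 0, -2)` loop: series[i] is None → continue;
-- n = int(v) (v is already an Int, so int(v) = v, no exception); n < 0 → continue; else return n.
-- pyGet? returning none is an IndexError (unreachable here; Python would raise → port yields none).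
def aLoop (series : List (Option Int)) : List Int → Option Int
  | [] => none
  | i :: rest =>
    match PySem.List.pyGet? series i with
    | none => none
    | some none => aLoop series rest
    | some (some v) => if v < 0 then aLoop series rest else some v

def csv_last_value_py (series : List (Option Int)) : Option Int :=
  if series.length < 2 then none
  else
    aLoop series (PySem.List.pyRange
      (if (series.length : Int) % 2 == 0 then (series.length : Int) - 1
       else (series.length : Int) - 2) 0 (-2))

-- ===== PORT B =====
-- one iteration of Source B's for-loop body: v is None → keep result; n = int(v) (= v, an Int);
-- n ≥ 0 → result = n, else keep result.
def bStep (result : Option Int) (v : Option Int) : Option Int :=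
  match v with
  | none => result
  | some n => if n ≥ 0 then some n else result

-- Source B's pair-walk: each for-step takes `_t` and then v = next(it, None) off the iterator;
-- a dangling single element gets v = None (skipped), and an empty rest ends the loop.
def bLoop (result : Option Int) : List (Option Int) → Option Int
  | [] => result
  | [_t] => result
  | _t :: v :: rest => bLoop (bStep result v) rest

def csv_last_value_py_alt (series : List (Option Int)) : Option Int :=
  if series.length < 2 then none else bLoop none series

-- ===== PRECONDITION & SPEC =====
def Spec_csv_last_value_py (series : List (Option Int)) (out : Option Int) : Prop := out = csv_last_value_py_alt series
instance (series : List (Option Int)) (out : Option Int) : Decidable (Spec_csv_last_value_py series out) := by unfold Spec_csv_last_value_py; infer_instance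

-- ===== CLAIM (what is proved, stated in full; the proofs are below) =====
def Claim_equal_csv_last_value_py : Prop := ∀ (series : List (Option Int)), Dom_csv_last_value_py series → Spec_csv_last_value_py series (csv_last_value_py series)

-- ===== LEMMAS AND PROOFS =====

-- the value filter both programs apply to a value slot
def pvFilt (v : Option Int) : Option Int :=
  match v with
  | none => none
  | some n => if n < 0 then none else some n

-- the value subsequence: elements at odd positions (second of each (time, value) pair)
def oddVals : List (Option Int) → List (Option Int)
  | [] => []
  | [_] => []
  | _ :: v :: rest => v :: oddVals rest

theorem bStep_eq_or (acc v : Option Int) : bStep acc v = (pvFilt v).or acc := by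
  cases v with
  | none => rfl
  | some n =>
    simp only [bStep, pvFilt]
    by_cases h : n < 0
    · rw [if_neg (by omega : ¬ n ≥ 0), if_pos h, Option.none_or]
    · rw [if_pos (by omega : n ≥ 0), if_neg h, Option.some_or]

theorem bLoop_eq (l : List (Option Int)) : ∀ acc,
    bLoop acc l = ((oddVals l).reverse.findSome? pvFilt).or acc := by
  induction l using oddVals.induct with
  | case1 => intro acc; rfl
  | case2 t => intro acc; rfl
  | case3 t v rest ih =>
    intro acc
    simp only [bLoop, oddVals, List.reverse_cons, List.findSome?_append, ih,
      bStep_eq_or, List.findSome?_cons]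
    cases h : pvFilt v
    · simp
    · simp

theorem oddVals_length (l : List (Option Int)) : (oddVals l).length = l.length / 2 := by
  induction l using oddVals.induct with
  | case1 => rfl
  | case2 t => simp [oddVals]
  | case3 t v rest ih => simp only [oddVals, List.length_cons, ih]; omega

theorem oddVals_getElem? (l : List (Option Int)) : ∀ (k : ℕ),
    (oddVals l)[k]? = l[2 * k + 1]? := by
  induction l using oddVals.induct with
  | case1 => intro k; simp [oddVals]
  | case2 t => intro k; simp [oddVals]
  | case3 t v rest ih =>
    intro k
    cases k with
    | zero => rfl
    | succ k =>
      have h3 : 2 * (k + 1) + 1 = (2 * k + 1) + 1 + 1 := by ring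
      rw [h3, List.getElem?_cons_succ, List.getElem?_cons_succ]
      simp only [oddVals, List.getElem?_cons_succ]
      exact ih k

-- range(2m-1, 0, -2) = [2m-1, 2m-3, …, 1]
theorem pyRange_neg_two (m : ℕ) :
    PySem.List.pyRange (2 * (m : Int) - 1) 0 (-2) =
      (List.range m).map (fun (k : ℕ) => 2 * (m : Int) - 1 - 2 * (k : Int)) := by
  rcases Nat.eq_zero_or_pos m with hm | hm
  · subst hm
    simp only [Nat.cast_zero, List.range_zero, List.map_nil]
    rfl
  · simp only [PySem.List.pyRange]
    rw [if_neg (by norm_num : ¬ (-2 : Int) = 0),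
      if_neg (by norm_num : ¬ (0 : Int) < -2),
      if_pos (by omega : (0 : Int) < 2 * (m : Int) - 1)]
    have hc : ((2 * (m : Int) - 1 - 0 + -(-2) - 1) / -(-2)).toNat = m := by
      have h1 : (2 * (m : Int) - 1 - 0 + -(-2) - 1) = 2 * m := by ring
      have h2 : (-(-2) : Int) = 2 := by norm_num
      rw [h1, h2]
      omega
    rw [hc]
    apply List.map_congr_left
    intro k _
    ring

-- A's scan, when every index is a valid position, is a findSome? of the filtered values
theorem aLoop_findSome (series : List (Option Int)) (idxs : List Int)
    (hv : ∀ i ∈ idxs, 0 ≤ i ∧ i < series.length) :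
    aLoop series idxs = idxs.findSome? (fun i => pvFilt (series.getD i.toNat none)) := by
  induction idxs with
  | nil => rfl
  | cons i rest ih =>
    have hi := hv i (by simp)
    have hilen : i.toNat < series.length := by omega
    have hget : PySem.List.pyGet? series i = some (series.getD i.toNat none) := by
      have h1 : i = ((i.toNat : ℕ) : Int) := by omega
      rw [h1, PySem.List.pyGet?_natCast, Int.toNat_natCast,
        List.getD_eq_getElem?_getD, List.getElem?_eq_getElem hilen]
      rfl
    have ihr := ih (fun j hj => hv j (by simp [hj]))
    simp only [aLoop, hget, List.findSome?_cons]
    cases hval : series.getD i.toNat none with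
    | none => simpa [pvFilt, hval] using ihr
    | some v =>
      simp only [pvFilt]
      split
      · simpa using ihr
      · rfl

theorem main_eq (series : List (Option Int)) (h2 : 2 ≤ series.length) :
    csv_last_value_py series = csv_last_value_py_alt series := by
  unfold csv_last_value_py csv_last_value_py_alt
  have hA : ¬ (series.length < 2) := by omega
  rw [if_neg hA, if_neg hA]
  set m : ℕ := series.length / 2 with hm
  have hstart : (if (series.length : Int) % 2 == 0 then (series.length : Int) - 1
      else (series.length : Int) - 2) = 2 * (m : Int) - 1 := by
    rcases Int.even_or_odd (series.length : Int) with ⟨c, hc⟩ | ⟨c, hc⟩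
    · rw [if_pos (by rw [beq_iff_eq]; omega)]
      push_cast [hm]; omega
    · rw [if_neg (by rw [beq_iff_eq]; omega)]
      push_cast [hm]; omega
  rw [hstart, pyRange_neg_two, bLoop_eq, Option.or_none]
  have hv : ∀ i ∈ (List.range m).map (fun (k : ℕ) => 2 * (m : Int) - 1 - 2 * (k : Int)),
      0 ≤ i ∧ i < series.length := by
    intro i hi
    simp only [List.mem_map, List.mem_range] at hi
    obtain ⟨k, hk, rfl⟩ := hi
    constructor
    · omega
    · omega
  rw [aLoop_findSome series _ hv]
  have hL : (oddVals series).length = m := by rw [oddVals_length, hm]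
  have hlist : (List.range m).map
      (fun (k : ℕ) => series.getD (2 * (m : Int) - 1 - 2 * (k : Int)).toNat none) =
      (oddVals series).reverse := by
    apply List.ext_getElem
    · simp [hL]
    · intro k hk1 hk2
      simp only [List.length_map, List.length_range] at hk1
      simp only [List.getElem_map, List.getElem_range, List.getElem_reverse]
      have hidx : 2 * ((oddVals series).length - 1 - k) + 1 < series.length := by
        rw [hL]; omega
      have h5 := oddVals_getElem? series ((oddVals series).length - 1 - k)
      rw [List.getElem?_eq_getElem (by omega : (oddVals series).length - 1 - k < (oddVals series).length),
        List.getElem?_eq_getElem hidx] at h5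
      have harg : (2 * (m : Int) - 1 - 2 * (k : Int)).toNat =
          2 * ((oddVals series).length - 1 - k) + 1 := by rw [hL]; omega
      rw [harg, List.getD_eq_getElem?_getD, List.getElem?_eq_getElem hidx]
      simpa using h5.symm
  calc ((List.range m).map (fun (k : ℕ) => 2 * (m : Int) - 1 - 2 * (k : Int))).findSome?
        (fun i => pvFilt (series.getD i.toNat none))
      = ((List.range m).map
          (fun (k : ℕ) => series.getD (2 * (m : Int) - 1 - 2 * (k : Int)).toNat none)).findSome?
          pvFilt := by
        rw [List.findSome?_map, List.findSome?_map]; rfl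
    _ = (oddVals series).reverse.findSome? pvFilt := by rw [hlist]

-- ===== VERDICT (by name: the statement is the Claim_ definition above) =====
theorem csv_last_value_py_spec : Claim_equal_csv_last_value_py := by
  intro series _hdom
  unfold Spec_csv_last_value_py
  rcases lt_or_ge series.length 2 with h | h
  · unfold csv_last_value_py csv_last_value_py_alt
    rw [if_pos h, if_pos h]
  · exact main_eq series h
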